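-- pv_equiv track=rewrite | github.com/partech2015/OpenDify | main.py | encode_conversation_id
-- ===== SOURCE A (Python) =====
-- def encode_conversation_id(conversation_id):
--     """将conversation_id编码为不可见的字符序列"""
--     if not conversation_id:
--         return ""
--
--     # 使用Base64编码减少长度
--     import base64
--     encoded = base64.b64encode(conversation_id.encode()).decode()
--
--     # 使用8种不同的零宽字符表示3位数字
--     # 这样可以将编码长度进一步减少
--     char_map = {
--         '0': '\u200b',  # 零宽空格
--         '1': '\u200c',  # 零宽非连接符
--         '2': '\u200d',  # 零宽连接符
--         '3': '\ufeff',  # 零宽非断空格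
--         '4': '\u2060',  # 词组连接符
--         '5': '\u180e',  # 蒙古语元音分隔符
--         '6': '\u2061',  # 函数应用
--         '7': '\u2062',  # 不可见乘号
--     }
--
--     # 将Base64字符串转换为八进制数字
--     result = []
--     for c in encoded:
--         # 将每个字符转换为8进制数字（0-7）
--         if c.isalpha():
--             if c.isupper():
--                 val = ord(c) - ord('A')
--             else:
--                 val = ord(c) - ord('a') + 26
--         elif c.isdigit():
--             val = int(c) + 52
--         elif c == '+':
--             val = 62
--         elif c == '/':
--             val = 63
--         else:  # '='
--             val = 0
--
--         # 每个Base64字符可以产生2个3位数字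
--         first = (val >> 3) & 0x7
--         second = val & 0x7
--         result.append(char_map[str(first)])
--         if c != '=':  # 不编码填充字符的后半部分
--             result.append(char_map[str(second)])
--
--     return ''.join(result)
-- ===== SOURCE B (Python) =====
-- # Direct bit-level encoder: the zero-width output is just the input's bit stream in
-- # 3-bit (octal) groups, 3 input bytes -> 8 digits, with one pad marker per missing byte.
-- _ZW = '\u200b\u200c\u200d\ufeff\u2060\u180e\u2061\u2062'
--
-- def encode_conversation_id(conversation_id):
--     data = conversation_id.encode()
--     out = []
--     for i in range(0, len(data), 3):
--         chunk = data[i:i + 3]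
--         r = len(chunk)
--         digits = 2 * (r + 1)
--         n = int.from_bytes(chunk, 'big') << (3 * digits - 8 * r)
--         out.append(''.join(_ZW[(n >> 3 * k) & 7] for k in reversed(range(digits))))
--         out.append(_ZW[0] * (3 - r))
--     return ''.join(out)
-- ===== Notes on version B (the rewrite author's own statement) =====
-- stated objective: alternative
-- what changed: B drops the base64 intermediate string entirely: it packs each 3-byte chunk of the UTF-8 bytes into an integer and emits its bits directly as 3-bit octal digits mapped to zero-width characters (plus one pad marker per missing byte of the last chunk), replacing A's base64-encode step and per-character branch chain with a single chunked bit-extraction loop.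
import Mathlib
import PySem

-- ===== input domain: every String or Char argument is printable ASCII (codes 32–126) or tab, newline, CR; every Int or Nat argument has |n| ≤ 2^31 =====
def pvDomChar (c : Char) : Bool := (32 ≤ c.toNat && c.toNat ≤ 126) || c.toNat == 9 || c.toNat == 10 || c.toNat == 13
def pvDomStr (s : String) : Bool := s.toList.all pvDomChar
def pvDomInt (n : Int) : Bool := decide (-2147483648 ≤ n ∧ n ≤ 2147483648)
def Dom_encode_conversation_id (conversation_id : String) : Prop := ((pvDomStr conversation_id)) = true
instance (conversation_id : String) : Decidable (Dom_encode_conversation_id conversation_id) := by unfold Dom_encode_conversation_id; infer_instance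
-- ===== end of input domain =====

-- B drops the base64 intermediate entirely and emits the byte stream's bits directly as
-- 3-bit octal digits (3-byte chunks), replacing A's base64 step + per-character branch loop.

-- ===== PORT A =====
-- base64 alphabet and the library call base64.b64encode, ported as the standard algorithm
def pvB64Chars : List Char :=
  "ABCDEFGHIJKLMNOPQRSTUVWXYZabcdefghijklmnopqrstuvwxyz0123456789+/".toList

def pvB64 (i : Nat) : Char := pvB64Chars.getD i 'A'

def pvB64Enc : List Nat → List Char
  | [] => []
  | [a] => [pvB64 (a >>> 2), pvB64 ((a &&& 3) <<< 4), '=', '=']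
  | [a, b] => [pvB64 (a >>> 2), pvB64 ((a &&& 3) <<< 4 ||| b >>> 4), pvB64 ((b &&& 15) <<< 2), '=']
  | a :: b :: c :: rest =>
      pvB64 (a >>> 2) :: pvB64 ((a &&& 3) <<< 4 ||| b >>> 4) :: pvB64 ((b &&& 15) <<< 2 ||| c >>> 6) ::
        pvB64 (c &&& 63) :: pvB64Enc rest

-- A's char_map, keyed by the decimal digit strings '0'..'7' as in the source.
def pvCharMapA : PySem.Dict String String :=
  PySem.Dict.ofList
    [("0", "\u200b"), ("1", "\u200c"), ("2", "\u200d"), ("3", "\ufeff"),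
     ("4", "\u2060"), ("5", "\u180e"), ("6", "\u2061"), ("7", "\u2062")]

-- A's loop body for one base64 character: the strings appended to result.
-- (int(c) on a single ASCII digit is c.toNat - 48; char_map[k] never misses, getD "".)
def pvStepA (c : Char) : List String :=
  let val : Nat :=
    if PySem.Chars.isalpha c then
      (if PySem.Chars.isupper c then c.toNat - 65 else c.toNat - 97 + 26)
    else if PySem.Chars.isdigit c then (c.toNat - 48) + 52
    else if c = '+' then 62
    else if c = '/' then 63
    else 0
  let first := (val >>> 3) &&& 0x7
  let second := val &&& 0x7
  [pvCharMapA.getD (PySem.Int.toStr first) ""] ++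
    (if c ≠ '=' then [pvCharMapA.getD (PySem.Int.toStr second) ""] else [])

def encode_conversation_id (conversation_id : String) : String :=
  if conversation_id = "" then "" else
  let encoded := pvB64Enc (conversation_id.toList.map Char.toNat)
  PySem.Str.join "" (encoded.foldl (fun acc c => acc ++ pvStepA c) [])

-- ===== PORT B =====
def pvZW : List Char :=
  ['\u200b', '\u200c', '\u200d', '\ufeff', '\u2060', '\u180e', '\u2061', '\u2062']

-- _ZW[i]: the index is always 0..7 here, so plain getD is exact
def pvZWg (i : Nat) : Char := pvZW.getD i ' '

-- ''.join(_ZW[(n >> 3*k) & 7] for k in reversed(range(digits)))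
def pvDigitsB (n digits : Nat) : List Char :=
  ((List.range digits).reverse).map (fun k => pvZWg ((n >>> (3 * k)) &&& 7))

-- one iteration of B's loop body: the two strings appended for one chunk
def pvChunkB (chunk : List Nat) : List String :=
  let r := chunk.length
  let digits := 2 * (r + 1)
  -- int.from_bytes(chunk, 'big') << (3*digits - 8*r)
  let n := (chunk.foldl (fun acc x => acc * 256 + x) 0) <<< (3 * digits - 8 * r)
  [String.ofList (pvDigitsB n digits), String.ofList (List.replicate (3 - r) (pvZWg 0))]

-- for i in range(0, len(data), 3): structural recursion over the 3-byte chunks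
def pvChunksB : List Nat → List String
  | [] => []
  | [a] => pvChunkB [a]
  | [a, b] => pvChunkB [a, b]
  | a :: b :: c :: rest => pvChunkB [a, b, c] ++ pvChunksB rest

def encode_conversation_id_alt (conversation_id : String) : String :=
  PySem.Str.join "" (pvChunksB (conversation_id.toList.map Char.toNat))

-- ===== PRECONDITION & SPEC =====
def Spec_encode_conversation_id (conversation_id : String) (out : String) : Prop := out = encode_conversation_id_alt conversation_id
instance (conversation_id : String) (out : String) : Decidable (Spec_encode_conversation_id conversation_id out) := by unfold Spec_encode_conversation_id; infer_instance

-- ===== CLAIM (what is proved, stated in full; the proofs are below) =====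
def Claim_equal_encode_conversation_id : Prop := ∀ (conversation_id : String), Dom_encode_conversation_id conversation_id → Spec_encode_conversation_id conversation_id (encode_conversation_id conversation_id)

-- ===== LEMMAS AND PROOFS =====

-- bitwise ops as arithmetic
theorem pv_and7 (x : Nat) : x &&& 7 = x % 8 := by
  have := Nat.and_two_pow_sub_one_eq_mod x 3; norm_num at this; omega
theorem pv_and3 (x : Nat) : x &&& 3 = x % 4 := by
  have := Nat.and_two_pow_sub_one_eq_mod x 2; norm_num at this; omega
theorem pv_and15 (x : Nat) : x &&& 15 = x % 16 := by
  have := Nat.and_two_pow_sub_one_eq_mod x 4; norm_num at this; omega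
theorem pv_and63 (x : Nat) : x &&& 63 = x % 64 := by
  have := Nat.and_two_pow_sub_one_eq_mod x 6; norm_num at this; omega
theorem pv_shr (x k : Nat) : x >>> k = x / 2 ^ k := Nat.shiftRight_eq_div_pow x k
theorem pv_lor16 : ∀ x < 4, ∀ y < 16, (x <<< 4 ||| y) = 16 * x + y := by decide
theorem pv_lor4 : ∀ x < 16, ∀ y < 4, (x <<< 2 ||| y) = 4 * x + y := by decide

-- A's loop body on each base64 alphabet character, and on '='
set_option maxRecDepth 4000 in
theorem pv_stepA_char : ∀ i < 64,
    ((pvStepA (pvB64 i)).map String.toList).flatten = [pvZWg (i / 8), pvZWg (i % 8)] := by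
  decide

theorem pv_stepA_pad : ((pvStepA '=').map String.toList).flatten = [pvZWg 0] := by decide

-- the three chunk shapes agree character-for-character
theorem pv_chunk3 (a b c : Nat) (ha : a < 256) (hb : b < 256) (hc : c < 256) :
    (([pvB64 (a >>> 2), pvB64 ((a &&& 3) <<< 4 ||| b >>> 4),
       pvB64 ((b &&& 15) <<< 2 ||| c >>> 6), pvB64 (c &&& 63)].flatMap pvStepA).map
        String.toList).flatten =
      ((pvChunkB [a, b, c]).map String.toList).flatten := by
  have h1 : (a &&& 3) <<< 4 ||| b >>> 4 = 16 * (a % 4) + b / 16 := by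
    rw [pv_and3, pv_shr]; exact pv_lor16 _ (by omega) _ (by norm_num; omega)
  have h2 : (b &&& 15) <<< 2 ||| c >>> 6 = 4 * (b % 16) + c / 64 := by
    rw [pv_and15, pv_shr]; exact pv_lor4 _ (by omega) _ (by norm_num; omega)
  have e0 := pv_stepA_char (a >>> 2) (by rw [pv_shr]; norm_num; omega)
  have e1 := pv_stepA_char _ (show 16 * (a % 4) + b / 16 < 64 by omega)
  have e2 := pv_stepA_char _ (show 4 * (b % 16) + c / 64 < 64 by omega)
  have e3 := pv_stepA_char (c &&& 63) (by rw [pv_and63]; omega)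
  rw [h1, h2]
  simp only [List.flatMap_cons, List.flatMap_nil, List.map_append, List.flatten_append,
    List.append_nil, e0, e1, e2, e3]
  simp only [pvChunkB, pvDigitsB, List.length_cons, List.length_nil]
  norm_num [List.range_succ, List.foldl]
  simp only [pv_and7, pv_and63, pv_shr]
  norm_num [List.replicate]
  repeat' apply And.intro
  all_goals exact congrArg pvZWg (by omega)

theorem pv_chunk1 (a : Nat) (ha : a < 256) :
    (([pvB64 (a >>> 2), pvB64 ((a &&& 3) <<< 4), '=', '='].flatMap pvStepA).map
        String.toList).flatten =
      ((pvChunkB [a]).map String.toList).flatten := by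
  have e0 := pv_stepA_char (a >>> 2) (by rw [pv_shr]; norm_num; omega)
  have e1 := pv_stepA_char ((a &&& 3) <<< 4)
    (by rw [pv_and3, Nat.shiftLeft_eq]; norm_num; omega)
  simp only [List.flatMap_cons, List.flatMap_nil, List.map_append, List.flatten_append,
    List.append_nil, e0, e1, pv_stepA_pad]
  simp only [pvChunkB, pvDigitsB, List.length_cons, List.length_nil]
  norm_num [List.range_succ, List.foldl]
  simp only [pv_and7, pv_and3, pv_shr, Nat.shiftLeft_eq]
  norm_num [List.replicate]
  repeat' apply And.intro
  all_goals exact congrArg pvZWg (by omega)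

theorem pv_chunk2 (a b : Nat) (ha : a < 256) (hb : b < 256) :
    (([pvB64 (a >>> 2), pvB64 ((a &&& 3) <<< 4 ||| b >>> 4),
       pvB64 ((b &&& 15) <<< 2), '='].flatMap pvStepA).map String.toList).flatten =
      ((pvChunkB [a, b]).map String.toList).flatten := by
  have h1 : (a &&& 3) <<< 4 ||| b >>> 4 = 16 * (a % 4) + b / 16 := by
    rw [pv_and3, pv_shr]; exact pv_lor16 _ (by omega) _ (by norm_num; omega)
  have e0 := pv_stepA_char (a >>> 2) (by rw [pv_shr]; norm_num; omega)
  have e1 := pv_stepA_char _ (show 16 * (a % 4) + b / 16 < 64 by omega)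
  have e2 := pv_stepA_char ((b &&& 15) <<< 2)
    (by rw [pv_and15, Nat.shiftLeft_eq]; norm_num; omega)
  rw [h1]
  simp only [List.flatMap_cons, List.flatMap_nil, List.map_append, List.flatten_append,
    List.append_nil, e0, e1, e2, pv_stepA_pad]
  simp only [pvChunkB, pvDigitsB, List.length_cons, List.length_nil]
  norm_num [List.range_succ, List.foldl]
  simp only [pv_and7, pv_and15, pv_shr, Nat.shiftLeft_eq]
  norm_num [List.replicate]
  repeat' apply And.intro
  all_goals exact congrArg pvZWg (by omega)

-- the two encoders agree on the flattened character stream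
theorem pv_main (bs : List Nat) (h : ∀ x ∈ bs, x < 256) :
    (((pvB64Enc bs).flatMap pvStepA).map String.toList).flatten =
      ((pvChunksB bs).map String.toList).flatten := by
  induction bs using pvB64Enc.induct with
  | case1 => rfl
  | case2 a =>
      have := pv_chunk1 a (h a (by simp))
      simpa [pvB64Enc, pvChunksB] using this
  | case3 a b =>
      have := pv_chunk2 a b (h a (by simp)) (h b (by simp))
      simpa [pvB64Enc, pvChunksB] using this
  | case4 a b c rest ih =>
      have hc3 := pv_chunk3 a b c (h a (by simp)) (h b (by simp)) (h c (by simp))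
      have ih' := ih (fun x hx => h x (by simp [hx]))
      simp only [List.flatMap_cons, List.flatMap_nil, List.map_append,
        List.flatten_append, List.append_nil, ← List.append_assoc] at hc3
      simp only [pvB64Enc, pvChunksB, List.flatMap_cons, List.map_append,
        List.flatten_append, ← List.append_assoc]
      rw [ih', hc3]

theorem pvFlatten_intersperse_nil {α : Type} (xs : List (List α)) :
    (List.intersperse ([] : List α) xs).flatten = xs.flatten := by
  induction xs with
  | nil => rfl
  | cons x xs ih =>
      cases xs with
      | nil => rfl
      | cons y ys => simp [List.intersperse] at ih ⊢; simpa using ih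

theorem pvJoinE (parts : List String) :
    PySem.Str.join "" parts = String.ofList ((parts.map String.toList).flatten) := by
  simp [PySem.Str.join, PySem.Chars.join, List.intercalate, pvFlatten_intersperse_nil]

theorem pv_foldl_flatMap (l : List Char) (init : List String) :
    l.foldl (fun acc c => acc ++ pvStepA c) init = init ++ l.flatMap pvStepA := by
  induction l generalizing init with
  | nil => simp
  | cons c l ih => simp [List.foldl_cons, ih, List.flatMap_cons]

-- ===== VERDICT (by name: the statement is the Claim_ definition above) =====
theorem encode_conversation_id_spec : Claim_equal_encode_conversation_id := by
  intro s hdom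
  unfold Spec_encode_conversation_id encode_conversation_id encode_conversation_id_alt
  by_cases hs : s = ""
  · subst hs; decide
  · simp only [if_neg hs]
    have hbytes : ∀ x ∈ s.toList.map Char.toNat, x < 256 := by
      intro x hx
      rcases List.mem_map.mp hx with ⟨c, hc, rfl⟩
      have := List.all_eq_true.mp hdom c hc
      simp [pvDomChar] at this
      omega
    rw [pvJoinE, pvJoinE, pv_foldl_flatMap, List.nil_append, pv_main _ hbytes]
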